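-- pv_equiv track=rewrite | github.com/terryyizhongru/TurnTakingPD | gen_SSL4PR_csv_random.py | partition_speakers_by_prefix
-- ===== SOURCE A (Python) =====
-- def partition_speakers_by_prefix(all_speakers):
--     """
--     Partition speaker IDs into buckets based on whether they start with '21', '22', or neither.
--     Returns three lists: speakers_21, speakers_22, speakers_others
--     """
--     speakers_21 = []
--     speakers_22 = []
--     speakers_others = []
--     for sp in all_speakers:
--         if sp.startswith("21"):
--             speakers_21.append(sp)
--         elif sp.startswith("22"):
--             speakers_22.append(sp)
--         else:
--             speakers_others.append(sp)
--     return speakers_21, speakers_22, speakers_others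
-- ===== SOURCE B (Python) =====
-- def partition_speakers_by_prefix(all_speakers):
--     """Partition speaker IDs by prefix using three independent filtering passes."""
--     return (
--         [s for s in all_speakers if s.startswith("21")],
--         [s for s in all_speakers if s.startswith("22")],
--         [s for s in all_speakers if not s.startswith("21") and not s.startswith("22")],
--     )
-- ===== Notes on version B (the rewrite author's own statement) =====
-- stated objective: simpler
-- what changed: Replaced the single pass with an elif chain and three mutable accumulators by three independent filtering comprehensions, one per bucket.
import Mathlib
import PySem

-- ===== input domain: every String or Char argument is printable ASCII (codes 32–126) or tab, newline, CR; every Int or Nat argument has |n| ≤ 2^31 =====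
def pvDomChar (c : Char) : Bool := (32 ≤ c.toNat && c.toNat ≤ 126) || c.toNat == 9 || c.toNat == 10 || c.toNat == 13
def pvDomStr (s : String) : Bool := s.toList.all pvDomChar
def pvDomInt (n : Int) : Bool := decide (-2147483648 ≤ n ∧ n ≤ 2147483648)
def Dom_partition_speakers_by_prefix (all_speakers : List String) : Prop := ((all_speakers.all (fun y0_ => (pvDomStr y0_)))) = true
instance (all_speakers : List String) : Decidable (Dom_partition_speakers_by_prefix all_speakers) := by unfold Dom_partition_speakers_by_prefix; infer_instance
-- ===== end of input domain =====

-- ===== PORT A =====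
-- B replaces A's single pass with an elif chain by three independent filtering passes. Objective: simpler.
def partition_speakers_by_prefix (all_speakers : List String) : List String × List String × List String :=
  let r := all_speakers.foldl (fun (acc : List String × List String × List String) sp =>
    if PySem.Str.startswith sp "21" then (acc.1 ++ [sp], acc.2.1, acc.2.2)
    else if PySem.Str.startswith sp "22" then (acc.1, acc.2.1 ++ [sp], acc.2.2)
    else (acc.1, acc.2.1, acc.2.2 ++ [sp])) ([], [], [])
  r

-- ===== PORT B =====
def partition_speakers_by_prefix_alt (all_speakers : List String) : List String × List String × List String :=
  (all_speakers.filter (fun s => PySem.Str.startswith s "21"),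
   all_speakers.filter (fun s => PySem.Str.startswith s "22"),
   all_speakers.filter (fun s => !PySem.Str.startswith s "21" && !PySem.Str.startswith s "22"))

-- ===== PRECONDITION & SPEC =====
def Spec_partition_speakers_by_prefix (all_speakers : List String) (out : List String × List String × List String) : Prop := out = partition_speakers_by_prefix_alt all_speakers
instance (all_speakers : List String) (out : List String × List String × List String) : Decidable (Spec_partition_speakers_by_prefix all_speakers out) := by unfold Spec_partition_speakers_by_prefix; infer_instance

-- ===== CLAIM (what is proved, stated in full; the proofs are below) =====
def Claim_equal_partition_speakers_by_prefix : Prop := ∀ (all_speakers : List String), Dom_partition_speakers_by_prefix all_speakers → Spec_partition_speakers_by_prefix all_speakers (partition_speakers_by_prefix all_speakers)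

-- ===== LEMMAS AND PROOFS =====

-- ===== VERDICT (by name: the statement is the Claim_ definition above) =====
theorem pv_fold_inv (xs : List String) (a b c : List String) :
    xs.foldl (fun (acc : List String × List String × List String) sp =>
      if PySem.Str.startswith sp "21" then (acc.1 ++ [sp], acc.2.1, acc.2.2)
      else if PySem.Str.startswith sp "22" then (acc.1, acc.2.1 ++ [sp], acc.2.2)
      else (acc.1, acc.2.1, acc.2.2 ++ [sp])) (a, b, c)
    = (a ++ xs.filter (fun s => PySem.Str.startswith s "21"),
       b ++ xs.filter (fun s => PySem.Str.startswith s "22"),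
       c ++ xs.filter (fun s => !PySem.Str.startswith s "21" && !PySem.Str.startswith s "22")) := by
  induction xs generalizing a b c with
  | nil => simp
  | cons x xs ih =>
    simp only [List.foldl_cons, List.filter_cons]
    by_cases h1 : PySem.Str.startswith x "21" = true
    · rw [if_pos h1, ih]
      rw [PySem.Str.startswith_eq, PySem.Chars.startswith_iff] at h1
      obtain ⟨t, ht⟩ := h1
      simp [PySem.Chars.startswith_iff, ← ht, List.cons_prefix_cons]
    · by_cases h2 : PySem.Str.startswith x "22" = true
      · rw [if_neg h1, if_pos h2, ih]
        rw [PySem.Str.startswith_eq, PySem.Chars.startswith_iff] at h2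
        obtain ⟨t, ht⟩ := h2
        simp [PySem.Chars.startswith_iff, ← ht, List.cons_prefix_cons]
      · rw [if_neg h1, if_neg h2, ih]
        rw [PySem.Str.startswith_eq] at h1 h2
        simp only [Bool.not_eq_true] at h1 h2
        simp only [show "21".toList = ['2','1'] from rfl, show "22".toList = ['2','2'] from rfl] at h1 h2
        simp [h1, h2]

theorem partition_speakers_by_prefix_spec : Claim_equal_partition_speakers_by_prefix := by
  intro xs _
  unfold Spec_partition_speakers_by_prefix partition_speakers_by_prefix partition_speakers_by_prefix_alt
  simpa using pv_fold_inv xs [] [] []
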